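-- pv_equiv track=rewrite | github.com/ball-lightning6/neural-sculpting-paradigm | to_be_organized/generate_hanoi_tower_build_full_state_graph.py | calc_process_idx_list
-- ===== SOURCE A (Python) =====
-- def calc_process_idx_list(region, length):
--     if length==2:
--         return [region[0],region[1]-1]
--     else:
--         region_mid_idx = (region[0]+region[1]+1)//2
--         x=calc_process_idx_list([region[0],region_mid_idx], length//2)
--         x.extend(calc_process_idx_list([region_mid_idx,region[1]], length//2))
--         return x
-- ===== SOURCE B (Python) =====
-- def calc_process_idx_list(region, length):
--     out = []
--     stack = [(region[0], region[1], length)]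
--     while stack:
--         a, b, n = stack.pop()
--         if n == 2:
--             out.append(a)
--             out.append(b - 1)
--         else:
--             m = (a + b + 1) // 2
--             stack.append((m, b, n // 2))
--             stack.append((a, m, n // 2))
--     return out
-- ===== Notes on version B (the rewrite author's own statement) =====
-- stated objective: alternative
-- what changed: Replaces A's binary recursion (build left half, extend with right half) by an explicit-stack loop that pops (a,b,n) intervals, emitting [a,b-1] at n==2 and pushing the two halves right-then-left otherwise.
import Mathlib
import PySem

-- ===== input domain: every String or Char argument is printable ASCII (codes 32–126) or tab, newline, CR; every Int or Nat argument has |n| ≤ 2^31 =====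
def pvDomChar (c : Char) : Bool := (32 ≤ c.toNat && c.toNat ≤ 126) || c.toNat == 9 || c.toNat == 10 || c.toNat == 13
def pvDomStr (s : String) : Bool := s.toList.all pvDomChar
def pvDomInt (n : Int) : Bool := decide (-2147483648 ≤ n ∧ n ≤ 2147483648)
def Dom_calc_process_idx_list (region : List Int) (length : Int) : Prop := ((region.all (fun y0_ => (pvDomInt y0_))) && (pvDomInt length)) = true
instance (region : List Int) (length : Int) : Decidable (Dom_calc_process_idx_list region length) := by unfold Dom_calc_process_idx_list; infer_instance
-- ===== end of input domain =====

-- B replaces A's binary recursion by an explicit-stack loop (alternative decomposition, same cost).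


-- ===== PORT A =====
-- A's unbounded recursion with a fuel guard making it total: on lengths whose repeated
-- halving never reaches 2 the Python diverges (excluded by Pre_) and the port returns []
-- when fuel runs out; on Pre_ inputs the recursion depth is at most 31 < 64, so the fuel
-- is never exhausted and the port is exact.
def calcA_fuel (fuel : Nat) (a b n : Int) : List Int :=
  match fuel with
  | 0 => []
  | fuel + 1 =>
    if n = 2 then [a, b - 1]
    else
      let m := PySem.Int.floordiv (a + b + 1) 2
      calcA_fuel fuel a m (PySem.Int.floordiv n 2) ++ calcA_fuel fuel m b (PySem.Int.floordiv n 2)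

-- region[0] / region[1]: IndexError (none) when region has fewer than 2 elements; excluded by Pre_.
def calc_process_idx_list (region : List Int) (length : Int) : List Int :=
  match PySem.List.pyGet? region 0, PySem.List.pyGet? region 1 with
  | some a, some b => calcA_fuel 64 a b length
  | _, _ => []

-- ===== PORT B =====
-- The while-stack loop of Source B: pop (a,b,n); at n == 2 append a and b-1 to out; otherwise
-- push (m,b,n//2) then (a,m,n//2) (so (a,m,·) is popped first — here the two pushes and the
-- next pop are fused into putting (a,m,·) at the head). Fuel bounds the loop-iteration
-- count to make the port total: on Pre_ inputs the loop runs at most `length` iterations,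
-- so the fuel is never exhausted and the port is exact; on lengths where the Python loop
-- never terminates (excluded by Pre_) the port returns the accumulator when fuel runs out.
def calcB_loop (fuel : Nat) (stack : List (Int × Int × Int)) (out : List Int) : List Int :=
  match fuel, stack with
  | _, [] => out
  | 0, _ => out
  | fuel + 1, (a, b, n) :: rest =>
    if n = 2 then calcB_loop fuel rest (out ++ [a, b - 1])
    else
      let m := PySem.Int.floordiv (a + b + 1) 2
      calcB_loop fuel ((a, m, PySem.Int.floordiv n 2) :: (m, b, PySem.Int.floordiv n 2) :: rest) out

def calc_process_idx_list_alt (region : List Int) (length : Int) : List Int :=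
  (((PySem.List.pyGet? region 0).bind fun a =>
    (PySem.List.pyGet? region 1).map fun b =>
      calcB_loop (length.toNat + 1) [(a, b, length)] [])).getD []

-- ===== PRECONDITION & SPEC =====
-- Pre_ excludes exactly the inputs on which the Python A raises or diverges: region shorter
-- than 2 (IndexError on region[1]) and lengths whose repeated floor-halving never reaches 2
-- (infinite recursion / RecursionError), i.e. length outside [2·2^k, 3·2^k) for every k —
-- equivalently (with k = bitLength length - 2): 2 ≤ length and length < 3·2^(bitLength length - 2).
-- Nothing A returns on is excluded.
def Pre_calc_process_idx_list (region : List Int) (length : Int) : Prop :=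
  2 ≤ region.length ∧ 2 ≤ length ∧ length < 3 * 2 ^ (PySem.Int.bitLength length - 2)
instance (region : List Int) (length : Int) : Decidable (Pre_calc_process_idx_list region length) := by
  unfold Pre_calc_process_idx_list; infer_instance

def pvWitness_calc_process_idx_list : List Int × Int := ([0, 8], 8)

def Spec_calc_process_idx_list (region : List Int) (length : Int) (out : List Int) : Prop := out = calc_process_idx_list_alt region length
instance (region : List Int) (length : Int) (out : List Int) : Decidable (Spec_calc_process_idx_list region length out) := by unfold Spec_calc_process_idx_list; infer_instance

-- ===== CLAIM (what is proved, stated in full; the proofs are below) =====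
def Claim_equal_calc_process_idx_list : Prop := ∀ (region : List Int) (length : Int), Dom_calc_process_idx_list region length → Pre_calc_process_idx_list region length → Spec_calc_process_idx_list region length (calc_process_idx_list region length)

-- ===== LEMMAS AND PROOFS =====

-- 'n is a good length of depth k': repeated halving reaches 2 after exactly k steps.
def GoodLen (n : Int) (k : Nat) : Prop := 2 * 2 ^ k ≤ n ∧ n < 3 * 2 ^ k

theorem goodLen_desc {n : Int} {k : Nat} (h : GoodLen n (k + 1)) :
    GoodLen (PySem.Int.floordiv n 2) k := by
  obtain ⟨h1, h2⟩ := h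
  rw [PySem.Int.floordiv_eq_ediv_of_pos (by norm_num : (0:Int) < 2)]
  have e : (2:Int) ^ (k + 1) = 2 * 2 ^ k := by ring
  rw [e] at h1 h2
  unfold GoodLen
  generalize (2:Int) ^ k = c at *
  omega

theorem goodLen_succ_ne_two {n : Int} {k : Nat} (h : GoodLen n (k + 1)) : n ≠ 2 := by
  obtain ⟨h1, _⟩ := h
  have hc : (1:Int) ≤ 2 ^ (k + 1) := one_le_pow₀ (by norm_num)
  omega

theorem goodLen_zero_eq_two {n : Int} (h : GoodLen n 0) : n = 2 := by
  obtain ⟨h1, h2⟩ := h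
  simp at h1 h2
  omega

-- A's result does not depend on the fuel, as long as the fuel exceeds the depth.
theorem calcA_fuel_indep : ∀ (k : Nat) (a b n : Int) (f₁ f₂ : Nat), GoodLen n k →
    k < f₁ → k < f₂ → calcA_fuel f₁ a b n = calcA_fuel f₂ a b n := by
  intro k
  induction k with
  | zero =>
    intro a b n f₁ f₂ hg h1 h2
    obtain ⟨f₁, rfl⟩ := Nat.exists_eq_add_of_lt h1
    obtain ⟨f₂, rfl⟩ := Nat.exists_eq_add_of_lt h2
    have hn := goodLen_zero_eq_two hg
    simp [calcA_fuel, hn]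
  | succ k ih =>
    intro a b n f₁ f₂ hg h1 h2
    obtain ⟨f₁', rfl⟩ : ∃ f, f₁ = f + 1 := ⟨f₁ - 1, by omega⟩
    obtain ⟨f₂', rfl⟩ : ∃ f, f₂ = f + 1 := ⟨f₂ - 1, by omega⟩
    have hn := goodLen_succ_ne_two hg
    have hg' := goodLen_desc hg
    simp only [calcA_fuel, hn, if_false]
    rw [ih _ _ _ f₁' f₂' hg' (by omega) (by omega),
        ih _ _ _ f₁' f₂' hg' (by omega) (by omega)]

-- number of loop iterations B spends on one stack entry of depth k
def stepsFor (k : Nat) : Nat := 2 ^ (k + 1) - 1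

-- Processing the top stack entry takes stepsFor k iterations and contributes exactly
-- A's list for that interval, in order, to the accumulator.
theorem calcB_step : ∀ (k : Nat) (n a b : Int), GoodLen n k →
    ∀ (f : Nat) (rest : List (Int × Int × Int)) (out : List Int), stepsFor k ≤ f →
      calcB_loop f ((a, b, n) :: rest) out
        = calcB_loop (f - stepsFor k) rest (out ++ calcA_fuel (k + 1) a b n) := by
  intro k
  induction k with
  | zero =>
    intro n a b hg f rest out hf
    have hn := goodLen_zero_eq_two hg
    have h1 : stepsFor 0 = 1 := rfl
    obtain ⟨f', rfl⟩ : ∃ f', f = f' + 1 := ⟨f - 1, by simp [h1] at hf; omega⟩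
    subst hn
    simp [calcB_loop, calcA_fuel, h1]
  | succ k ih =>
    intro n a b hg f rest out hf
    have hn := goodLen_succ_ne_two hg
    have hg' := goodLen_desc hg
    have hsteps : stepsFor (k + 1) = 2 * stepsFor k + 1 := by
      unfold stepsFor
      have : (1:Nat) ≤ 2 ^ (k + 1) := Nat.one_le_two_pow
      rw [pow_succ]
      omega
    obtain ⟨f', rfl⟩ : ∃ f', f = f' + 1 := by
      refine ⟨f - 1, ?_⟩
      have : (1:Nat) ≤ stepsFor (k + 1) := by rw [hsteps]; omega
      omega
    rw [calcB_loop]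
    simp only [hn, if_false]
    have hf1 : stepsFor k ≤ f' := by omega
    rw [ih _ _ _ hg' f' _ out hf1]
    have hf2 : stepsFor k ≤ f' - stepsFor k := by omega
    rw [ih _ _ _ hg' _ _ _ hf2]
    have hfuel : f' + 1 - stepsFor (k + 1) = f' - stepsFor k - stepsFor k := by omega
    rw [hfuel]
    have hA : calcA_fuel (k + 1 + 1) a b n
        = calcA_fuel (k + 1) a (PySem.Int.floordiv (a + b + 1) 2) (PySem.Int.floordiv n 2)
          ++ calcA_fuel (k + 1) (PySem.Int.floordiv (a + b + 1) 2) b (PySem.Int.floordiv n 2) := by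
      simp only [calcA_fuel, hn, if_false]
    rw [hA, List.append_assoc]

-- Pre_ (with the Dom_ size bound) yields a depth witness k ≤ 30.
theorem pre_goodLen {length : Int} (hdom : length ≤ 2147483648)
    (h2 : 2 ≤ length) (h3 : length < 3 * 2 ^ (PySem.Int.bitLength length - 2)) :
    ∃ k ≤ 30, GoodLen length k := by
  set bl := PySem.Int.bitLength length with hbl
  have hne : length ≠ 0 := by omega
  have hup : length.natAbs < 2 ^ bl := PySem.Int.lt_two_pow_bitLength length
  have hlow : 2 ^ (bl - 1) ≤ length.natAbs := PySem.Int.two_pow_bitLength_le length hne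
  have habs : (length.natAbs : Int) = length := Int.natAbs_of_nonneg (by omega)
  have hbl2 : 2 ≤ bl := by
    by_contra hc
    interval_cases bl <;> omega
  refine ⟨bl - 2, ?_, ?_, h3⟩
  · -- bl - 2 ≤ 30, from 2^(bl-1) ≤ |length| ≤ 2^31
    have h31 : length.natAbs ≤ 2 ^ 31 := by omega
    have : 2 ^ (bl - 1) ≤ 2 ^ 31 := le_trans hlow h31
    have := (Nat.pow_le_pow_iff_right (by norm_num : 1 < 2)).mp this
    omega
  · -- 2 * 2^(bl-2) ≤ length
    have hsucc : bl - 1 = (bl - 2) + 1 := by omega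
    have : ((2 ^ (bl - 1) : Nat) : Int) ≤ (length.natAbs : Int) := by exact_mod_cast hlow
    rw [habs] at this
    rw [hsucc] at this
    push_cast at this
    calc (2:Int) * 2 ^ (bl - 2) = 2 ^ ((bl - 2) + 1) := by ring
    _ ≤ length := this

-- ===== VERDICT (by name: the statement is the Claim_ definition above) =====
theorem calc_process_idx_list_spec : Claim_equal_calc_process_idx_list := by
  intro region length hdom hpre
  unfold Spec_calc_process_idx_list
  obtain ⟨hr, h2, h3⟩ := hpre
  have hlen : length ≤ 2147483648 := by
    unfold Dom_calc_process_idx_list pvDomInt at hdom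
    simp only [Bool.and_eq_true, decide_eq_true_eq] at hdom
    exact hdom.2.2
  obtain ⟨k, hk30, hgood⟩ := pre_goodLen hlen h2 h3
  unfold calc_process_idx_list calc_process_idx_list_alt
  cases hA : PySem.List.pyGet? region 0 <;> cases hB : PySem.List.pyGet? region 1 <;> try rfl
  rename_i a b
  show calcA_fuel 64 a b length = calcB_loop (length.toNat + 1) [(a, b, length)] []
  -- fuel bound for B: stepsFor k ≤ length.toNat
  have hfuel : stepsFor k ≤ length.toNat := by
    obtain ⟨hg1, _⟩ := hgood
    have hcast : ((2 ^ (k + 1) : Nat) : Int) ≤ length := by push_cast; calc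
      ((2:Int)) ^ (k+1) = 2 * 2 ^ k := by ring
      _ ≤ length := hg1
    unfold stepsFor
    omega
  rw [calcB_step k length a b hgood (length.toNat + 1) [] [] (by omega)]
  rw [calcB_loop]
  rw [List.nil_append]
  exact calcA_fuel_indep k a b length 64 (k + 1) hgood (by omega) (by omega)
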